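-- pv_equiv track=rewrite | github.com/AdamSimkinbgu/Intro-to-CS-Python-Assignments | Assignment4-RecursionAndDecimalToBaseOps/Assignment4.py | string_overlap_dual
-- ===== SOURCE A (Python) =====
-- def string_overlap_detector(core, rep, repetition):
--     """
--     This method is taking two strings and compares for overlapping subsequences, depending on the required repetition,
--     returns true or false.
--     :param core [str] - first string (to be checked on)
--     :param rep [str] - second string (to be checked with)
--     :param repetition [int] - number of repetition required of rep in core
--     :return bool value
--     """
--     if len(core) == 0:
--         if repetition == 0:
--             return True
--         return False
--     if core[:len(rep)] == rep:
--         repetition -= 1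
--         return string_overlap_detector(core[1:], rep, repetition)
--     return string_overlap_detector(core[1:], rep, repetition)
--
-- def string_overlap_dual(string_1, string_2, repetition):
--     """
--     This method enhances the functionality of @string_overlap_detector, allowing the function to check whether
--     the strings could be switched during the evaluation to find the first string in the second as well as second string
--     in the first string
--     :param string_1 [str] - first string
--     :param string_2 [str] - second string
--     :param repetition [int] - number of repetition required of rep in core (or other way around)
--     :return bool value
--     """
--     if len(string_1) >= len(string_2):
--         if string_overlap_detector(string_1, string_2, repetition):
--             return True
--         return False
--     if len(string_2) == 0:
--         if repetition == 0:
--             return True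
--         return False
--     if string_2[:len(string_1)] == string_1:
--         repetition -= 1
--         return string_overlap_dual(string_2[1:], string_1, repetition)
--     return string_overlap_dual(string_2[1:], string_1, repetition)
-- ===== SOURCE B (Python) =====
-- def string_overlap_dual(string_1, string_2, repetition):
--     """Pick the longer string as the text and the shorter as the pattern,
--     count overlapping occurrences of the pattern at each start position of
--     the text, and compare that count with the required repetition."""
--     core, pat = (string_1, string_2) if len(string_1) >= len(string_2) else (string_2, string_1)
--     count = sum(1 for i in range(len(core)) if core[i:i+len(pat)] == pat)
--     return repetition == count
-- ===== Notes on version B (the rewrite author's own statement) =====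
-- stated objective: simpler
-- what changed: Replaces A's pair of counter-threading recursions (a detector plus a dual that re-inlines the detector and swaps its arguments each step) with a single swap-once, count-all-match-positions comprehension compared against repetition.
import Mathlib
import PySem

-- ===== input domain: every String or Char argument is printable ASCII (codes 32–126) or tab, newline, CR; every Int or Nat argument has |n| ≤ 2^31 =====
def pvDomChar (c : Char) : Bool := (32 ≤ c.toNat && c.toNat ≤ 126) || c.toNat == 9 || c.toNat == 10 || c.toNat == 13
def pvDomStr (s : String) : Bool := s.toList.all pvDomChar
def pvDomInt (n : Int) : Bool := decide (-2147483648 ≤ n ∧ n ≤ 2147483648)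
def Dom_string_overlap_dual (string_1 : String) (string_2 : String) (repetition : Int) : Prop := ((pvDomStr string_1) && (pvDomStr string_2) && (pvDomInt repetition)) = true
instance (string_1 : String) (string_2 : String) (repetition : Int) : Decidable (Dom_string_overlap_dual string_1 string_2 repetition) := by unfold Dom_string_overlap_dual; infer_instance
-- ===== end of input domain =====

-- B replaces A's two counter-threading recursions by a swap-once position count compared with repetition (objective: simpler).

-- ===== PORT A =====
-- string_overlap_detector, on List Char; core[:len(rep)] is a nonneg-bound slice = List.take
def pvDetector (core rep : List Char) (repetition : Int) : Bool :=
  match core with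
  | [] => if repetition = 0 then true else false
  | _ :: tail =>
      if core.take rep.length == rep then pvDetector tail rep (repetition - 1)
      else pvDetector tail rep repetition

-- the dual recursion, on List Char (swaps its arguments when recursing, as A does)
def pvDualGo (l1 l2 : List Char) (repetition : Int) : Bool :=
  if l2.length ≤ l1.length then pvDetector l1 l2 repetition
  else
    match l2 with
    | [] => if repetition = 0 then true else false
    | _ :: t2 =>
        if l2.take l1.length == l1 then pvDualGo t2 l1 (repetition - 1)
        else pvDualGo t2 l1 repetition
termination_by l1.length + l2.length
decreasing_by all_goals (simp only [List.length_cons]; omega)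

def string_overlap_dual (string_1 : String) (string_2 : String) (repetition : Int) : Bool :=
  pvDualGo string_1.toList string_2.toList repetition

-- ===== PORT B =====
def string_overlap_dual_alt (string_1 : String) (string_2 : String) (repetition : Int) : Bool :=
  let p := if string_2.toList.length ≤ string_1.toList.length
           then (string_1.toList, string_2.toList) else (string_2.toList, string_1.toList)
  let core := p.1
  let pat := p.2
  repetition == ((List.range core.length).countP (fun i => (core.drop i).take pat.length == pat) : Int)

-- ===== PRECONDITION & SPEC =====
def Spec_string_overlap_dual (string_1 : String) (string_2 : String) (repetition : Int) (out : Bool) : Prop := out = string_overlap_dual_alt string_1 string_2 repetition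
instance (string_1 : String) (string_2 : String) (repetition : Int) (out : Bool) : Decidable (Spec_string_overlap_dual string_1 string_2 repetition out) := by unfold Spec_string_overlap_dual; infer_instance

-- ===== CLAIM (what is proved, stated in full; the proofs are below) =====
def Claim_equal_string_overlap_dual : Prop := ∀ (string_1 : String) (string_2 : String) (repetition : Int), Dom_string_overlap_dual string_1 string_2 repetition → Spec_string_overlap_dual string_1 string_2 repetition (string_overlap_dual string_1 string_2 repetition)

-- ===== LEMMAS AND PROOFS =====

-- the detector compares repetition with the number of match positions
theorem pvDetector_eq_count (core rep : List Char) (r : Int) :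
    pvDetector core rep r
      = (r == ((List.range core.length).countP (fun i => (core.drop i).take rep.length == rep) : Int)) := by
  induction core generalizing r with
  | nil =>
      simp only [pvDetector, List.length_nil, List.range_zero, List.countP_nil,
        Nat.cast_zero]
      by_cases h0 : r = 0 <;> simp [h0]
  | cons c cs ih =>
      rw [pvDetector]
      have hrange : List.range (c :: cs).length
          = 0 :: (List.range cs.length).map Nat.succ := by
        simp [List.range_succ_eq_map]
      rw [hrange]
      by_cases h : (c :: cs).take rep.length == rep
      · simp only [if_pos h, ih, List.countP_cons, List.countP_map]
        simp only [List.drop_zero, h, Function.comp_def, List.drop_succ_cons]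
        rcases eq_or_ne r (((List.countP (fun i => (cs.drop i).take rep.length == rep) (List.range cs.length)) : Int) + 1) with he | he
        · simp [he]
        · have h1 : ¬ (r - 1 = ((List.countP (fun i => (cs.drop i).take rep.length == rep) (List.range cs.length)) : Int)) := by omega
          simp [he, h1]
      · simp only [if_neg h, ih, List.countP_cons, List.countP_map]
        simp [List.drop_zero, h, Function.comp_def, List.drop_succ_cons]
  
-- the dual recursion equals the detector on (longer, shorter)
theorem pvDualGo_eq_detector (l1 l2 : List Char) (r : Int) :
    pvDualGo l1 l2 r
      = (if l2.length ≤ l1.length then pvDetector l1 l2 r else pvDetector l2 l1 r) := by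
  by_cases h : l2.length ≤ l1.length
  · rw [pvDualGo.eq_def]; simp [h]
  · rw [pvDualGo.eq_def]
    simp only [if_neg h]
    match l2 with
    | [] => simp at h
    | c :: t2 =>
        have ht : l1.length ≤ t2.length := by simp at h; omega
        rw [pvDetector]
        by_cases hm : (c :: t2).take l1.length == l1
        · simp only [if_pos hm]
          rw [pvDualGo.eq_def]; simp [ht]
        · simp only [if_neg hm]
          rw [pvDualGo.eq_def]; simp [ht]

-- ===== VERDICT (by name: the statement is the Claim_ definition above) =====
theorem string_overlap_dual_spec : Claim_equal_string_overlap_dual := by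
  intro s1 s2 r _
  unfold Spec_string_overlap_dual string_overlap_dual string_overlap_dual_alt
  rw [pvDualGo_eq_detector]
  simp only [pvDetector_eq_count]
  by_cases h : s2.toList.length ≤ s1.toList.length
  · simp only [if_pos h]
  · simp only [if_neg h]
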